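-- pv_equiv track=rewrite | github.com/PiusKern/psydash | pages/measures.py | get_rater_selection
-- ===== SOURCE A (Python) =====
-- def get_rater_selection(measures_data):
--     rater_selection = {}
--     for measure in measures_data:
--         measure_copy = measure.copy()
--         if measure_copy['Rater'] not in rater_selection:
--             rater_selection[measure_copy['Rater']] = measure_copy['SelectRater']
--     rater_selection = dict(sorted(rater_selection.items()))
--     return rater_selection
-- ===== SOURCE B (Python) =====
-- def get_rater_selection(measures_data):
--     raters = sorted({m['Rater'] for m in measures_data})
--     return {r: next(m['SelectRater'] for m in measures_data if m['Rater'] == r)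
--             for r in raters}
-- ===== Notes on version B (the rewrite author's own statement) =====
-- stated objective: alternative
-- what changed: Instead of one pass filling a first-wins dict and sorting its items at the end, B first collects the distinct raters as a sorted set and then, for each rater in that order, scans the input for its first occurrence to take its SelectRater, so no dict-membership pass and no item sort are needed.
import Mathlib
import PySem

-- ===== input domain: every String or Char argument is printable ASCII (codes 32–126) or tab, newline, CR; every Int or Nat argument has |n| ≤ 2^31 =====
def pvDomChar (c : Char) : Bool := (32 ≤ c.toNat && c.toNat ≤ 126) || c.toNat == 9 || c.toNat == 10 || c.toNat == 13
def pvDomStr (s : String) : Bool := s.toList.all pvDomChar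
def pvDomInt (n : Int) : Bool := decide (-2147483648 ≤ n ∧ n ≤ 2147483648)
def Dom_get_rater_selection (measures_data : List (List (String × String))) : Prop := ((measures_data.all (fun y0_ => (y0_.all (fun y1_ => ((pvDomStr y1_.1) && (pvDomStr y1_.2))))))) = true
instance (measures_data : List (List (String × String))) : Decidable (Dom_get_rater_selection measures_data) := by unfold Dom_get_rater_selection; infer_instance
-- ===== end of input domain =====

-- B replaces A's first-wins dict pass + final item sort by sorting the distinct raters first and
-- scanning for each rater's first occurrence (objective: alternative decomposition, not faster).
-- A's unused measure.copy() is omitted in B (no observable effect for dict inputs).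

-- ===== PORT A =====
-- shared helper: m['Rater'] / m['SelectRater'] as total lookups (Pre_ guarantees presence where read)
def pvRater (m : List (String × String)) : String :=
  ((PySem.Dict.ofList m).get? "Rater").getD ""
def pvSelect (m : List (String × String)) : String :=
  ((PySem.Dict.ofList m).get? "SelectRater").getD ""

def get_rater_selection (measures_data : List (List (String × String))) : List (String × String) :=
  let rater_selection : PySem.Dict String String :=
    measures_data.foldl (fun acc measure =>
      let measure_copy := measure  -- measure.copy(): same contents, copy unobservable here
      if acc.contains (pvRater measure_copy) then acc
      else acc.insert (pvRater measure_copy) (pvSelect measure_copy)) PySem.Dict.empty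
  -- dict(sorted(d.items())): keys are unique, so the rebuilt dict's items are the sorted pair list
  PySem.List.sorted2 rater_selection.items (fun p => p.1) (fun p => p.2)

-- ===== PORT B =====
-- next(m['SelectRater'] for m in measures_data if m['Rater'] == r): first matching element's SelectRater
def pvFirstSelect (measures_data : List (List (String × String))) (r : String) : String :=
  match measures_data with
  | [] => ""  -- unreachable: r is always a rater occurring in measures_data
  | m :: rest => if pvRater m = r then pvSelect m else pvFirstSelect rest r

def get_rater_selection_alt (measures_data : List (List (String × String))) : List (String × String) :=
  let raters := PySem.List.sorted (PySem.Set.ofList (measures_data.map pvRater)) (fun r => r)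
  (raters.foldl (fun acc r => acc.insert r (pvFirstSelect measures_data r)) PySem.Dict.empty).items

-- ===== PRECONDITION & SPEC =====
-- Pre_ = exactly the inputs where Python A returns: every element has a 'Rater' key, and every
-- element whose rater does not occur earlier (A reads its 'SelectRater') has a 'SelectRater' key.
def Pre_get_rater_selection (measures_data : List (List (String × String))) : Prop :=
  (∀ m ∈ measures_data, ((PySem.Dict.ofList m).get? "Rater").isSome = true) ∧
  (∀ i < measures_data.length,
    ((measures_data.take i).all (fun m' => pvRater m' != pvRater (measures_data.getD i []))) = true →
    ((PySem.Dict.ofList (measures_data.getD i [])).get? "SelectRater").isSome = true)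
instance (measures_data : List (List (String × String))) : Decidable (Pre_get_rater_selection measures_data) := by
  unfold Pre_get_rater_selection; infer_instance

def pvWitness_get_rater_selection : (List (List (String × String))) :=
  [[("Rater", "b"), ("SelectRater", "y")], [("Rater", "a"), ("SelectRater", "x")], [("Rater", "b")]]

def Spec_get_rater_selection (measures_data : List (List (String × String))) (out : List (String × String)) : Prop := out = get_rater_selection_alt measures_data
instance (measures_data : List (List (String × String))) (out : List (String × String)) : Decidable (Spec_get_rater_selection measures_data out) := by unfold Spec_get_rater_selection; infer_instance

-- ===== CLAIM (what is proved, stated in full; the proofs are below) =====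
def Claim_equal_get_rater_selection : Prop := ∀ (measures_data : List (List (String × String))), Dom_get_rater_selection measures_data → Pre_get_rater_selection measures_data → Spec_get_rater_selection measures_data (get_rater_selection measures_data)

-- ===== LEMMAS AND PROOFS =====

-- Option-valued first SelectRater: some iff r occurs
def pvFind (measures_data : List (List (String × String))) (r : String) : Option String :=
  match measures_data with
  | [] => none
  | m :: rest => if pvRater m = r then some (pvSelect m) else pvFind rest r

theorem pvFirstSelect_eq_find (data : List (List (String × String))) (r : String) :
    pvFirstSelect data r = (pvFind data r).getD "" := by
  induction data with
  | nil => rfl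
  | cons m rest ih =>
    simp only [pvFirstSelect, pvFind]
    split_ifs with h <;> simp [ih]

-- A's loop, value view: the accumulated dict answers lookups by "first occurrence wins"
theorem foldA_get? (data : List (List (String × String))) :
    ∀ (acc : PySem.Dict String String) (r : String),
    (data.foldl (fun acc m =>
        if acc.contains (pvRater m) then acc
        else acc.insert (pvRater m) (pvSelect m)) acc).get? r
      = (acc.get? r).or (pvFind data r) := by
  induction data with
  | nil => intro acc r; simp [pvFind]
  | cons m rest ih =>
    intro acc r
    simp only [List.foldl_cons, pvFind]
    by_cases hc : acc.contains (pvRater m) = true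
    · simp only [hc, if_true]
      rw [ih]
      by_cases hr : pvRater m = r
      · subst hr
        rw [PySem.Dict.contains_eq_isSome_get?] at hc
        cases hget : acc.get? (pvRater m) with
        | none => rw [hget] at hc; simp at hc
        | some v => simp
      · simp [hr]
    · simp only [hc, if_false, Bool.false_eq_true]
      rw [ih]
      by_cases hr : pvRater m = r
      · subst hr
        rw [PySem.Dict.contains_eq_isSome_get?] at hc
        cases hget : acc.get? (pvRater m) with
        | none => simp [PySem.Dict.get?_insert_self, Option.or]
        | some v => rw [hget] at hc; simp at hc
      · rw [PySem.Dict.get?_insert_of_ne _ _ (by exact fun h => hr h.symm)]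
        simp [hr]

-- A's loop, key view: keys are the set-union of the old keys with the raters in order
theorem foldA_keys (data : List (List (String × String))) :
    ∀ (acc : PySem.Dict String String),
    (data.foldl (fun acc m =>
        if acc.contains (pvRater m) then acc
        else acc.insert (pvRater m) (pvSelect m)) acc).keys
      = PySem.Set.update acc.keys (data.map pvRater) := by
  induction data with
  | nil => intro acc; simp [PySem.Set.update]
  | cons m rest ih =>
    intro acc
    simp only [List.foldl_cons, List.map_cons, PySem.Set.update, List.foldl_cons]
    by_cases hc : acc.contains (pvRater m) = true
    · simp only [hc, if_true]
      rw [ih]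
      have hmem : pvRater m ∈ acc.keys := (PySem.Dict.contains_iff_mem_keys acc _).mp hc
      have : PySem.Set.add acc.keys (pvRater m) = acc.keys := by
        simp [PySem.Set.add, PySem.Set.contains, hmem]
      rw [this]; rfl
    · simp only [hc, if_false, Bool.false_eq_true]
      rw [ih]
      have hmem : pvRater m ∉ acc.keys := fun h =>
        hc ((PySem.Dict.contains_iff_mem_keys acc _).mpr h)
      have h1 : (acc.insert (pvRater m) (pvSelect m)).keys = acc.keys ++ [pvRater m] :=
        PySem.Dict.keys_insert_of_not_contains acc _ (by simpa using hc)
      have h2 : PySem.Set.add acc.keys (pvRater m) = acc.keys ++ [pvRater m] := by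
        simp [PySem.Set.add, PySem.Set.contains, hmem]
      rw [h1, h2]; rfl

-- insertBy only compares the inserted element with members of the accumulator
theorem insertBy_congr {α : Type} (f g : α → α → Bool) (x : α) :
    ∀ (acc : List α), (∀ b ∈ acc, f x b = g x b) →
    PySem.List.insertBy f x acc = PySem.List.insertBy g x acc := by
  intro acc
  induction acc with
  | nil => intro _; rfl
  | cons y ys ih =>
    intro h
    rw [PySem.List.insertBy.eq_def, PySem.List.insertBy.eq_def]
    simp only
    rw [h y (List.mem_cons_self)]
    split_ifs with hg
    · rfl
    · rw [ih (fun b hb => h b (List.mem_cons_of_mem _ hb))]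

theorem foldl_insertBy_congr {α : Type} (f g : α → α → Bool) (S : List α)
    (hfg : ∀ a ∈ S, ∀ b ∈ S, f a b = g a b) :
    ∀ (xs acc : List α), (∀ x ∈ xs, x ∈ S) → (∀ x ∈ acc, x ∈ S) →
    xs.foldl (fun acc x => PySem.List.insertBy f x acc) acc
      = xs.foldl (fun acc x => PySem.List.insertBy g x acc) acc := by
  intro xs
  induction xs with
  | nil => intro _ _ _; rfl
  | cons x rest ih =>
    intro acc hxs hacc
    have hx : x ∈ S := hxs x List.mem_cons_self
    simp only [List.foldl_cons]
    rw [insertBy_congr f g x acc (fun b hb => hfg x hx b (hacc b hb))]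
    apply ih
    · exact fun y hy => hxs y (List.mem_cons_of_mem _ hy)
    · intro y hy
      rcases (PySem.List.mem_insertBy g x y acc).mp hy with h | h
      · exact h ▸ hx
      · exact hacc y h

-- Python tuple sort of pairs with pairwise-distinct first components = sort by first component
theorem sorted2_eq_sorted_fst (xs : List (String × String))
    (hnd : (xs.map Prod.fst).Nodup) :
    PySem.List.sorted2 xs (fun p => p.1) (fun p => p.2)
      = PySem.List.sorted xs (fun p => p.1) := by
  simp only [PySem.List.sorted2, PySem.List.sorted]
  · apply foldl_insertBy_congr _ _ xs _ xs [] (fun _ h => h) (fun _ h => by simp at h)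
    intro a ha b hb
    by_cases hab : a = b
    · subst hab; simp
    · have hfst : a.1 ≠ b.1 := fun h => hab (List.inj_on_of_nodup_map hnd ha hb h)
      rcases lt_or_gt_of_ne hfst with h | h
      · simp [h, not_lt_of_gt h]
      · simp [h, not_lt_of_gt h]

theorem get_rater_selection_eq (data : List (List (String × String))) :
    get_rater_selection data = get_rater_selection_alt data := by
  unfold get_rater_selection get_rater_selection_alt
  simp only []
  set ratl := data.map pvRater with hratl
  set d : PySem.Dict String String :=
    data.foldl (fun acc m =>
      if acc.contains (pvRater m) then acc
      else acc.insert (pvRater m) (pvSelect m)) PySem.Dict.empty with hd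
  have hkeys : d.keys = PySem.Set.ofList ratl := by
    rw [hd, foldA_keys, PySem.Dict.keys_empty, PySem.Set.update_nil_left]
  have hnodupk : d.keys.Nodup := hkeys ▸ PySem.Set.nodup_ofList ratl
  -- A's dict items, explicitly
  have hitems : d.items = (PySem.Set.ofList ratl).map (fun k => (k, pvFirstSelect data k)) := by
    rw [PySem.Dict.items_eq_map_keys d hnodupk "", hkeys]
    apply List.map_congr_left
    intro k _
    rw [PySem.Dict.getD_eq_get?_getD, hd, foldA_get?, PySem.Dict.get?_empty,
      Option.none_or, pvFirstSelect_eq_find]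
  -- B's items, explicitly
  set sr := PySem.List.sorted (PySem.Set.ofList ratl) (fun r => r) with hsr
  have hsrnd : sr.Nodup :=
    ((PySem.List.sorted_perm (PySem.Set.ofList ratl) (fun r => r) false).nodup_iff).mpr
      (PySem.Set.nodup_ofList ratl)
  have hB : (sr.foldl (fun acc r => acc.insert r (pvFirstSelect data r)) PySem.Dict.empty).items
      = sr.map (fun r => (r, pvFirstSelect data r)) := by
    rw [PySem.Dict.items_foldl_insert_fresh sr (fun r => r) (fun r => pvFirstSelect data r)
      PySem.Dict.empty (fun a _ => PySem.Dict.contains_empty a) (by simpa using hsrnd)]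
    rfl
  rw [hB, hitems]
  -- tuple sort = sort by key, then name the sorted order
  have hmapfst : (((PySem.Set.ofList ratl).map (fun k => (k, pvFirstSelect data k))).map Prod.fst).Nodup := by
    simp only [List.map_map, Function.comp_def]
    simp [PySem.Set.nodup_ofList ratl]
  rw [sorted2_eq_sorted_fst _ hmapfst]
  apply PySem.List.sorted_eq_of_perm_of_pairwise_lt
  · exact (PySem.List.sorted_perm (PySem.Set.ofList ratl) (fun r => r) false).map _
  · rw [List.pairwise_map]
    exact PySem.List.sorted_ofList_pairwise_lt ratl

-- ===== VERDICT (by name: the statement is the Claim_ definition above) =====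
theorem get_rater_selection_spec : Claim_equal_get_rater_selection := by
  intro data _ _
  unfold Spec_get_rater_selection
  exact get_rater_selection_eq data
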